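-- pv_equiv track=rewrite | github.com/Kacperon/Projekty | ASD/kolosy/kol1/kol1_kopiec.py | maxrank
-- ===== SOURCE A (Python) =====
-- class SegmentTree:
--   # Pamięć O(n)
--   def __init__(self, n):
--     p = 1
--     while not ((1 << p) - (1 << (p - 1)) >= n): p += 1 # liczba liści musi być większa lub równa ilośći elementów
--     self.M = (1 << (p - 1)) # indeks pierwszego liścia
--     self.tree = [0] * (1 << p)
--
--   # Dodawanie elementu O(logn)
--   def add(self, a, v):
--     a += self.M
--     self.tree[a] += v
--     a //= 2
--     while a:
--       self.tree[a] = self.tree[2 * a] + self.tree[2 * a + 1]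
--       a //= 2
--
--   # Suma elementów z przedziału [a, b] O(logn)
--   def query(self, a, b):
--     if b < a: return 0
--     a += self.M
--     b += self.M
--     ans = self.tree[a]
--     if a != b: ans += self.tree[b]
--     while a // 2 != b // 2:
--       if a % 2 == 0: ans += self.tree[a + 1]
--       if b % 2 == 1: ans += self.tree[b - 1]
--       a //= 2
--       b //= 2
--     return ans
--
-- def merge_sort(T):
--   if len(T) <= 1: return T
--
--   L, R, a, b, idx = merge_sort(T[0:len(T) // 2]), merge_sort(T[len(T) // 2:]), 0, 0, 0
--   while a < len(L) and b < len(R):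
--     if L[a] <= R[b]:
--       T[idx] = L[a]
--       a += 1
--     else:
--       T[idx] = R[b]
--       b += 1
--     idx += 1
--
--   while a < len(L):
--     T[idx] = L[a]
--     a += 1
--     idx += 1
--
--   while b < len(R):
--     T[idx] = R[b]
--     b += 1
--     idx += 1
--
--   return T
--
-- def bs(T, x):
--   l, r = 0, len(T) - 1
--   while l <= r:
--     mid = (l + r) // 2
--     if T[mid] == x: return mid
--     if T[mid] > x: r = mid - 1
--     else: l = mid + 1
--   return -1
--
-- def maxrank(T):
--   if len(T) == 0: return 0
--
--   # Skalowanie danych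
--   tmp = T[:]
--   tmp = merge_sort(tmp)
--   uniq = [tmp[0]]
--   for x in tmp:
--     if x != uniq[-1]:
--       uniq.append(x)
--
--   for i in range(len(T)):
--     T[i] = bs(uniq, T[i])
--
--   # Główna część algorytmu
--   ST = SegmentTree(len(uniq))
--   ans = 0
--   for x in T:
--     ans = max(ans, ST.query(0, x - 1))
--     ST.add(x, 1)
--
--   return ans
-- ===== SOURCE B (Python) =====
-- def maxrank(T):
--     # Direct O(n^2) scan: for each element, count earlier strictly-smaller
--     # elements; return the maximum such count (0 for empty input).
--     # Note: unlike A, this does not mutate T in place; return value is identical.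
--     best = 0
--     seen = []
--     for x in T:
--         c = 0
--         for y in seen:
--             if y < x:
--                 c += 1
--         if c > best:
--             best = c
--         seen.append(x)
--     return best
-- ===== Notes on version B (the rewrite author's own statement) =====
-- stated objective: simpler
-- what changed: Replaces A's merge-sort coordinate compression, hand-written binary search and segment-tree prefix counting with one plain nested scan that counts earlier strictly-smaller elements directly; B also does not mutate T in place (return value is identical).
import Mathlib
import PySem

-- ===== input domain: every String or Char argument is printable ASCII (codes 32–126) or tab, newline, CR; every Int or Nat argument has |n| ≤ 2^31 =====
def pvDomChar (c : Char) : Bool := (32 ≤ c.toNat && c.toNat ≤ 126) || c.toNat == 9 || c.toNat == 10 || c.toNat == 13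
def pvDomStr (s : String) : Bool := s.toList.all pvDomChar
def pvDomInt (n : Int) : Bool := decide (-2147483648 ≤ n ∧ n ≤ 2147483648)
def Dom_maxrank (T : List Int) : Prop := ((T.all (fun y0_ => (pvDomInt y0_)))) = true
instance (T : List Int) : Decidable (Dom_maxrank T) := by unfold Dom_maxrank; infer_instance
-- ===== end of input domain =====

-- B replaces A's merge-sort compression + hand-written binary search + segment tree
-- by one plain nested scan (simpler, O(n^2) vs O(n log n)); equivalence is about the
-- RETURN value only: A overwrites T with compressed ranks in place, B does not mutate.

-- ===== PORT A =====

-- the merge phase of merge_sort: the three index-based while loops, written as the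
-- obvious structural recursion over the two sorted halves (the Python writes the
-- merged elements into T sequentially; the emitted sequence is identical)
def msMerge : List Int → List Int → List Int
  | [], r => r
  | a :: l, [] => a :: l
  | a :: l, b :: r =>
    if a ≤ b then a :: msMerge l (b :: r) else b :: msMerge (a :: l) r

def mergeSortA (T : List Int) : List Int :=
  if _h : T.length ≤ 1 then T
  else msMerge (mergeSortA (T.take (T.length / 2))) (mergeSortA (T.drop (T.length / 2)))
termination_by T.length
decreasing_by
  · simp only [List.length_take]; omega
  · simp only [List.length_drop]; omega

-- the "for x in tmp: if x != uniq[-1]: uniq.append(x)" loop, tracking uniq[-1]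
def uniqAux (last : Int) : List Int → List Int
  | [] => []
  | x :: xs => if x ≠ last then x :: uniqAux x xs else uniqAux last xs

-- the while loop of bs; l, r are Python ints.  At every call site reached from
-- maxrank, 0 ≤ l ≤ mid ≤ r < len(T), so indexing T[mid] via toNat/getD is exact.
def bsLoop (T : List Int) (x : Int) (l r : Int) : Int :=
  if _h : l ≤ r then
    let mid := PySem.Int.floordiv (l + r) 2
    if T.getD mid.toNat 0 = x then mid
    else if T.getD mid.toNat 0 > x then bsLoop T x l (mid - 1)
    else bsLoop T x (mid + 1) r
  else -1
termination_by (r + 1 - l).toNat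
decreasing_by
  · have := PySem.Int.floordiv_two_mid_bounds _h; omega
  · have := PySem.Int.floordiv_two_mid_bounds _h; omega

def bsA (T : List Int) (x : Int) : Int := bsLoop T x 0 ((T.length : Int) - 1)

-- SegmentTree.__init__'s "p = 1; while not (...): p += 1"; fueled (called with
-- fuel = n + 2, which always exceeds the ≤ ⌈log2 n⌉ + 1 iterations the loop makes)
def findP : Nat → Nat → Nat → Nat
  | 0, _, p => p
  | fuel + 1, n, p => if 2 ^ p - 2 ^ (p - 1) ≥ n then p else findP fuel n (p + 1)

-- SegmentTree.add's "while a: tree[a] = tree[2*a] + tree[2*a+1]; a //= 2"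
-- (all indices touched are in range at every call site reached from maxrank)
def addLoop (tree : List Int) (a : Nat) : List Int :=
  if a = 0 then tree
  else addLoop (tree.set a (tree.getD (2 * a) 0 + tree.getD (2 * a + 1) 0)) (a / 2)
termination_by a
decreasing_by omega

def stAdd (M : Nat) (tree : List Int) (a : Nat) (v : Int) : List Int :=
  let i := a + M
  addLoop (tree.set i (tree.getD i 0 + v)) (i / 2)

-- SegmentTree.query's "while a // 2 != b // 2: ...".  The a = 0 branch only makes
-- the recursion total (the Python loop would not terminate there; call sites from
-- maxrank always have a ≥ M ≥ 1).
def qloop (tree : List Int) (a b : Nat) (ans : Int) : Int :=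
  if a / 2 = b / 2 then ans
  else if _h : a = 0 then ans
  else
    qloop tree (a / 2) (b / 2)
      ((ans + (if a % 2 = 0 then tree.getD (a + 1) 0 else 0)) +
        (if b % 2 = 1 then tree.getD (b - 1) 0 else 0))
termination_by a

def stQuery (M : Nat) (tree : List Int) (a b : Int) : Int :=
  if b < a then 0
  else
    -- the only call site has a = 0 ≤ b, so the Nat view of indices a+M, b+M is exact
    let an := (a + (M : Int)).toNat
    let bn := (b + (M : Int)).toNat
    qloop tree an bn (tree.getD an 0 + (if an ≠ bn then tree.getD bn 0 else 0))

def maxrank (T : List Int) : Int :=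
  if T.length = 0 then 0
  else
    let tmp := mergeSortA T
    let t0 := tmp.getD 0 0                     -- tmp[0]; tmp is nonempty here
    let uniq := t0 :: uniqAux t0 tmp
    -- "for i in range(len(T)): T[i] = bs(uniq, T[i])" — bs always finds its key
    -- here (every T[i] is in uniq), so the rank is ≥ 0 and toNat below is exact
    let T' := T.map (fun x => bsA uniq x)
    let p := findP (uniq.length + 2) uniq.length 1
    let M := 2 ^ (p - 1)
    let st0 : List Int := List.replicate (2 ^ p) 0
    (T'.foldl
      (fun (s : List Int × Int) x =>
        (stAdd M s.1 x.toNat 1, max s.2 (stQuery M s.1 0 (x - 1))))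
      (st0, 0)).2

-- ===== PORT B =====

def maxrank_alt (T : List Int) : Int :=
  (T.foldl
    (fun (s : List Int × Int) x =>
      let c := s.1.foldl (fun c y => if y < x then c + 1 else c) 0
      (s.1 ++ [x], if c > s.2 then c else s.2))
    ([], 0)).2

-- ===== PRECONDITION & SPEC =====
def Spec_maxrank (T : List Int) (out : Int) : Prop := out = maxrank_alt T
instance (T : List Int) (out : Int) : Decidable (Spec_maxrank T out) := by unfold Spec_maxrank; infer_instance

-- ===== CLAIM (what is proved, stated in full; the proofs are below) =====
def Claim_equal_maxrank : Prop := ∀ (T : List Int), Dom_maxrank T → Spec_maxrank T (maxrank T)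

-- ===== LEMMAS AND PROOFS =====

-- value stored at node j of a perfect segment tree over leaf contents c (leaf i at
-- index M + i); node 0 is never read or written by A's tree code
def nodeVal (M : Nat) (c : Nat → Int) (j : Nat) : Int :=
  if j = 0 then 0
  else if M ≤ j then c (j - M)
  else nodeVal M c (2 * j) + nodeVal M c (2 * j + 1)
termination_by 2 * M - j
decreasing_by all_goals omega

-- the tree invariant maintained by A's main loop
def Agree (M : Nat) (c : Nat → Int) (tree : List Int) : Prop :=
  tree.length = 2 * M ∧ ∀ j, j < 2 * M → tree.getD j 0 = nodeVal M c j

-- the chain a, a/2, a/4, …, 1 of indices still to be rewritten by addLoop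
def chain (a : Nat) : List Nat :=
  if a = 0 then [] else a :: chain (a / 2)
termination_by a
decreasing_by omega

theorem msMerge_eq (L R : List Int) : msMerge L R = L.merge R (fun a b => a ≤ b) := by
  fun_induction msMerge with
  | case1 r => simp
  | case2 a l => simp
  | case3 a l b r hle ih => simp [hle, ih]
  | case4 a l b r hle ih => simp [hle, ih]

theorem mergeSortA_perm (T : List Int) : (mergeSortA T).Perm T := by
  fun_induction mergeSortA with
  | case1 T h => exact List.Perm.refl T
  | case2 T h ih1 ih2 =>
    rw [msMerge_eq]
    exact (List.merge_perm_append _).trans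
      ((ih1.append ih2).trans (List.Perm.of_eq (List.take_append_drop _ T)))

theorem mergeSortA_sorted (T : List Int) : (mergeSortA T).Pairwise (· ≤ ·) := by
  fun_induction mergeSortA with
  | case1 T h =>
    match T, h with
    | [], _ => simp
    | [a], _ => simp
  | case2 T h ih1 ih2 =>
    rw [msMerge_eq]
    have conv : ∀ (L : List Int), L.Pairwise (· ≤ ·) ↔
        L.Pairwise (fun a b => (decide (a ≤ b)) = true) := by
      intro L; constructor <;> (intro hp; exact hp.imp (by simp))
    rw [conv]
    exact List.pairwise_merge (by intro a b c h1 h2; simp at h1 h2 ⊢; omega)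
      (by intro a b; simp; omega) _ _ ((conv _).mp ih1) ((conv _).mp ih2)

theorem uniqAux_spec (xs : List Int) (last : Int) (hs : xs.Pairwise (· ≤ ·))
    (hle : ∀ y ∈ xs, last ≤ y) :
    (last :: uniqAux last xs).Pairwise (· < ·) ∧
      (∀ y, y ∈ last :: uniqAux last xs ↔ y = last ∨ y ∈ xs) := by
  induction xs generalizing last with
  | nil => constructor <;> simp [uniqAux]
  | cons x xs ih =>
    obtain ⟨hxle, hxs⟩ := List.pairwise_cons.mp hs
    by_cases hx : x = last
    · rw [show uniqAux last (x :: xs) = uniqAux last xs by simp [uniqAux, hx]]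
      obtain ⟨P, Hmem⟩ := ih last hxs (fun y hy => hle y (List.mem_cons_of_mem _ hy))
      refine ⟨P, fun y => ?_⟩
      rw [Hmem y]
      subst hx
      simp only [List.mem_cons]
      tauto
    · have hlast_lt : last < x :=
        lt_of_le_of_ne (hle x List.mem_cons_self) (Ne.symm hx)
      rw [show uniqAux last (x :: xs) = x :: uniqAux x xs by simp [uniqAux, hx]]
      obtain ⟨P, Hmem⟩ := ih x hxs hxle
      refine ⟨?_, fun y => ?_⟩
      · refine List.pairwise_cons.mpr ⟨fun y hy => ?_, P⟩
        rcases (Hmem y).mp hy with h | h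
        · omega
        · have := hxle y h; omega
      · have := Hmem y
        simp only [List.mem_cons] at this ⊢
        tauto

theorem bsLoop_spec (U : List Int) (hU : U.Pairwise (· < ·)) (x : Int) (ix : Nat)
    (hixlen : ix < U.length) (hval : U[ix] = x) (l r : Int) (h0 : 0 ≤ l)
    (hr : r ≤ (U.length : Int) - 1) (hl : l ≤ (ix : Int)) (hr2 : (ix : Int) ≤ r) :
    bsLoop U x l r = ix := by
  have hlr : l ≤ r := le_trans hl hr2
  obtain ⟨hm1, hm2⟩ := PySem.Int.floordiv_two_mid_bounds hlr
  rw [bsLoop, dif_pos hlr]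
  simp only []
  set m := PySem.Int.floordiv (l + r) 2 with hm
  have hmn : (m.toNat : Int) = m := Int.toNat_of_nonneg (by omega)
  have hmlen : m.toNat < U.length := by omega
  have hget : U.getD m.toNat 0 = U[m.toNat] := List.getD_eq_getElem U 0 hmlen
  have hmono := List.pairwise_iff_getElem.mp hU
  by_cases he : U[m.toNat] = x
  · rw [hget, if_pos he]
    have : m.toNat = ix := by
      rcases lt_trichotomy m.toNat ix with h1 | h1 | h1
      · have := hmono _ _ hmlen hixlen h1; rw [he, hval] at this; omega
      · exact h1
      · have := hmono _ _ hixlen hmlen h1; rw [he, hval] at this; omega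
    omega
  · rw [hget, if_neg he]
    by_cases hgt : U[m.toNat] > x
    · have hlt : ix < m.toNat := by
        rcases lt_trichotomy ix m.toNat with h1 | h1 | h1
        · exact h1
        · simp only [← h1] at hgt; rw [hval] at hgt; omega
        · have := hmono _ _ hmlen hixlen h1; rw [hval] at this; omega
      rw [if_pos hgt]
      exact bsLoop_spec U hU x ix hixlen hval l (m - 1) h0 (by omega) hl (by omega)
    · have hlt : m.toNat < ix := by
        rcases lt_trichotomy m.toNat ix with h1 | h1 | h1
        · exact h1
        · exact absurd (by simp only [h1]; exact hval) he
        · have := hmono _ _ hixlen hmlen h1; rw [hval] at this; omega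
      rw [if_neg hgt]
      exact bsLoop_spec U hU x ix hixlen hval (m + 1) r (by omega) hr (by omega) hr2
termination_by (r + 1 - l).toNat
decreasing_by all_goals omega

theorem findP_ge (fuel n p : Nat) (hp : 1 ≤ p) (hfuel : n ≤ 2 ^ (p - 1) + fuel) :
    1 ≤ findP fuel n p ∧ n ≤ 2 ^ (findP fuel n p - 1) := by
  induction fuel generalizing p with
  | zero => exact ⟨hp, by simpa using hfuel⟩
  | succ fuel ih =>
    rw [findP]
    split_ifs with h
    · have hps : p - 1 + 1 = p := Nat.sub_add_cancel hp
      have h2 : 2 ^ p = 2 * 2 ^ (p - 1) := by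
        conv_lhs => rw [← hps]
        rw [pow_succ]; ring
      exact ⟨hp, by omega⟩
    · have hps : p - 1 + 1 = p := Nat.sub_add_cancel hp
      have h2 : 2 ^ p = 2 * 2 ^ (p - 1) := by
        conv_lhs => rw [← hps]
        rw [pow_succ]; ring
      have h1 : 1 ≤ 2 ^ (p - 1) := Nat.one_le_two_pow
      exact ih (p + 1) (by omega) (by simpa using by omega)

theorem nodeVal_zero (M j : Nat) : nodeVal M (fun _ => 0) j = 0 := by
  rw [nodeVal]
  split_ifs with h1 h2
  · rfl
  · rfl
  · rw [nodeVal_zero M (2 * j), nodeVal_zero M (2 * j + 1)]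
    norm_num
termination_by 2 * M - j
decreasing_by all_goals omega

theorem nodeVal_update (M : Nat) (c : Nat → Int) (r : Nat) (j : Nat)
    (hna : ∀ k, (r + M) / 2 ^ k ≠ j) :
    nodeVal M (fun i => c i + if i = r then 1 else 0) j = nodeVal M c j := by
  by_cases h1 : j = 0
  · rw [nodeVal, if_pos h1]
    rw [nodeVal, if_pos h1]
  · by_cases h2 : M ≤ j
    · rw [nodeVal, if_neg h1, if_pos h2]
      rw [nodeVal, if_neg h1, if_pos h2]
      have hne : j - M ≠ r := by
        intro h
        exact hna 0 (by rw [pow_zero, Nat.div_one]; omega)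
      simp [hne]
    · rw [nodeVal, if_neg h1, if_neg h2]
      conv_rhs => rw [nodeVal, if_neg h1, if_neg h2]
      rw [nodeVal_update M c r (2 * j) ?_, nodeVal_update M c r (2 * j + 1) ?_]
      · intro k hk
        apply hna (k + 1)
        rw [pow_succ, ← Nat.div_div_eq_div_mul, hk]
        omega
      · intro k hk
        apply hna (k + 1)
        rw [pow_succ, ← Nat.div_div_eq_div_mul, hk]
        omega
termination_by 2 * M - j
decreasing_by all_goals omega

theorem chain_le (a : Nat) : ∀ j ∈ chain a, j ≤ a := by
  rw [chain]
  split_ifs with h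
  · simp
  · intro j hj
    rcases List.mem_cons.mp hj with h1 | h1
    · omega
    · have := chain_le (a / 2) j h1; omega
termination_by a
decreasing_by omega

theorem mem_chain (k : Nat) : ∀ (a j : Nat), j ≠ 0 → a / 2 ^ k = j → j ∈ chain a := by
  induction k with
  | zero =>
    intro a j hj h
    simp only [pow_zero, Nat.div_one] at h
    rw [chain, if_neg (by omega)]
    exact h ▸ List.mem_cons_self
  | succ k ih =>
    intro a j hj h
    have ha : a ≠ 0 := by rintro rfl; simp at h; omega
    rw [chain, if_neg ha]
    refine List.mem_cons_of_mem _ (ih (a / 2) j hj ?_)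
    rw [← h, pow_succ, Nat.div_div_eq_div_mul, Nat.mul_comm 2 (2 ^ k)]

theorem addLoop_spec (M : Nat) (c : Nat → Int) (a : Nat) (tree : List Int)
    (ha : a < M) (hlen : tree.length = 2 * M)
    (h : ∀ j, j < 2 * M → j ∉ chain a → tree.getD j 0 = nodeVal M c j) :
    Agree M c (addLoop tree a) := by
  rw [addLoop]
  by_cases h0 : a = 0
  · rw [if_pos h0]
    refine ⟨hlen, fun j hj => h j hj ?_⟩
    subst h0
    rw [chain]
    simp
  · rw [if_neg h0]
    refine addLoop_spec M c (a / 2)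
      (tree.set a (tree.getD (2 * a) 0 + tree.getD (2 * a + 1) 0))
      (by omega) (by simp [hlen]) ?_
    intro j hj hjc
    by_cases hja : j = a
    · subst hja
      have hset : (tree.set j (tree.getD (2 * j) 0 + tree.getD (2 * j + 1) 0)).getD j 0
          = tree.getD (2 * j) 0 + tree.getD (2 * j + 1) 0 := by
        have hjlen : j < tree.length := by omega
        simp [List.getD, hjlen]
      rw [hset, h (2 * j) (by omega) (fun hm => by have := chain_le j _ hm; omega),
        h (2 * j + 1) (by omega) (fun hm => by have := chain_le j _ hm; omega)]
      conv_rhs => rw [nodeVal]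
      rw [if_neg h0, if_neg (by omega)]
    · have hset : (tree.set a (tree.getD (2 * a) 0 + tree.getD (2 * a + 1) 0)).getD j 0
          = tree.getD j 0 := by
        simp [List.getD, List.getElem?_set_ne (fun hh => hja hh.symm)]
      rw [hset]
      refine h j hj ?_
      rw [chain, if_neg h0]
      simp only [List.mem_cons]
      tauto
termination_by a
decreasing_by omega

theorem stAdd_spec (M : Nat) (c : Nat → Int) (tree : List Int) (r : Nat)
    (hr : r < M) (h : Agree M c tree) :
    Agree M (fun i => c i + if i = r then 1 else 0) (stAdd M tree r 1) := by
  obtain ⟨hlen, hval⟩ := h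
  rw [stAdd]
  refine addLoop_spec M _ ((r + M) / 2) _ (by omega) (by simp [hlen]) ?_
  intro j hj hjc
  by_cases hjL : j = r + M
  · subst hjL
    have hset : (tree.set (r + M) (tree.getD (r + M) 0 + 1)).getD (r + M) 0
        = tree.getD (r + M) 0 + 1 := by
      have hrl : r + M < tree.length := by omega
      simp [List.getD, hrl]
    rw [hset, hval (r + M) (by omega)]
    rw [nodeVal, if_neg (by omega), if_pos (by omega)]
    conv_rhs => rw [nodeVal, if_neg (by omega), if_pos (by omega)]
    simp [show r + M - M = r by omega]
  · have hset : (tree.set (r + M) (tree.getD (r + M) 0 + 1)).getD j 0 = tree.getD j 0 := by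
      simp [List.getD, List.getElem?_set_ne (fun hh => hjL hh.symm)]
    rw [hset, hval j hj]
    by_cases hj0 : j = 0
    · subst hj0
      rw [nodeVal, if_pos rfl]
      conv_rhs => rw [nodeVal, if_pos rfl]
    · refine (nodeVal_update M c r j ?_).symm
      intro k hk
      cases k with
      | zero => simp at hk; omega
      | succ k' =>
        refine hjc (mem_chain k' ((r + M) / 2) j hj0 ?_)
        rw [← hk, pow_succ, Nat.div_div_eq_div_mul, Nat.mul_comm 2 (2 ^ k')]

theorem sum_pairs (f : Nat → Int) (u v : Nat) :
    ∑ j ∈ Finset.Ico u v, (f (2 * j) + f (2 * j + 1)) = ∑ i ∈ Finset.Ico (2 * u) (2 * v), f i := by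
  induction v with
  | zero => simp
  | succ w ih =>
    by_cases h : u ≤ w
    · rw [Finset.sum_Ico_succ_top h,
        show 2 * (w + 1) = (2 * w + 1) + 1 by omega,
        Finset.sum_Ico_succ_top (by omega), Finset.sum_Ico_succ_top (by omega), ih]
      ring
    · rw [Finset.Ico_eq_empty (by omega), Finset.Ico_eq_empty (by omega)]
      simp

theorem qloop_spec (M : Nat) (c : Nat → Int) (tree : List Int) (h : Agree M c tree)
    (e : Nat) : ∀ (a b : Nat) (ans : Int), 2 ^ e ≤ a → a ≤ b → b < 2 ^ (e + 1) →
    b < 2 * M → qloop tree a b ans = ans + ∑ i ∈ Finset.Ico (a + 1) b, nodeVal M c i := by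
  obtain ⟨hlen, hval⟩ := h
  induction e with
  | zero =>
    intro a b ans h1 h2 h3 h4
    norm_num at h1 h3
    have hab : a = 1 ∧ b = 1 := by omega
    rw [qloop, if_pos (by omega), Finset.Ico_eq_empty (by omega)]
    simp
  | succ e ih =>
    intro a b ans h1 h2 h3 h4
    rw [qloop]
    by_cases hab : a / 2 = b / 2
    · rw [if_pos hab, Finset.Ico_eq_empty (by omega)]
      simp
    · rw [if_neg hab]
      have hpe : 2 ^ (e + 1) = 2 * 2 ^ e := by rw [pow_succ]; ring
      have hpe2 : 2 ^ (e + 2) = 2 * 2 ^ (e + 1) := by rw [pow_succ]; ring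
      have hp1 : 1 ≤ 2 ^ e := Nat.one_le_two_pow
      have ha0 : ¬a = 0 := by omega
      rw [dif_neg ha0]
      have haltb : a < b := by omega
      rw [ih (a / 2) (b / 2) _ (by omega) (by omega) (by omega) (by omega)]
      rw [hval (a + 1) (by omega), hval (b - 1) (by omega)]
      -- turn the interior sum at the parent level into a sum of children
      have hchild : ∀ j ∈ Finset.Ico (a / 2 + 1) (b / 2),
          nodeVal M c j = nodeVal M c (2 * j) + nodeVal M c (2 * j + 1) := by
        intro j hj
        rw [Finset.mem_Ico] at hj
        rw [nodeVal, if_neg (by omega), if_neg (by omega : ¬ M ≤ j)]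
      rw [Finset.sum_congr rfl hchild, sum_pairs]
      have hsum : ∑ i ∈ Finset.Ico (a + 1) b, nodeVal M c i
          = (∑ i ∈ Finset.Ico (a + 1) (2 * (a / 2) + 2), nodeVal M c i
            + ∑ i ∈ Finset.Ico (2 * (a / 2) + 2) (2 * (b / 2)), nodeVal M c i)
            + ∑ i ∈ Finset.Ico (2 * (b / 2)) b, nodeVal M c i := by
        rw [Finset.sum_Ico_consecutive _ (by omega) (by omega : 2 * (a / 2) + 2 ≤ 2 * (b / 2)),
          Finset.sum_Ico_consecutive _ (by omega) (by omega : 2 * (b / 2) ≤ b)]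
      rw [hsum]
      have hA : ∑ i ∈ Finset.Ico (a + 1) (2 * (a / 2) + 2), nodeVal M c i
          = if a % 2 = 0 then nodeVal M c (a + 1) else 0 := by
        by_cases hpar : a % 2 = 0
        · rw [if_pos hpar, show 2 * (a / 2) + 2 = (a + 1) + 1 by omega,
            Finset.sum_Ico_succ_top (le_refl _)]
          simp
        · rw [if_neg hpar, Finset.Ico_eq_empty (by omega)]
          simp
      have hB : ∑ i ∈ Finset.Ico (2 * (b / 2)) b, nodeVal M c i
          = if b % 2 = 1 then nodeVal M c (b - 1) else 0 := by
        by_cases hpar : b % 2 = 1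
        · rw [if_pos hpar, show 2 * (b / 2) = b - 1 by omega,
            Finset.sum_Ico_eq_sum_range, show b - (b - 1) = 1 by omega]
          simp
        · rw [if_neg hpar, Finset.Ico_eq_empty (by omega)]
          simp
      rw [hA, hB]
      ring

theorem stQuery_spec (k M : Nat) (hM : M = 2 ^ k) (c : Nat → Int) (tree : List Int)
    (h : Agree M c tree) (v : Nat) (hv : v ≤ M) :
    stQuery M tree 0 ((v : Int) - 1) = ∑ i ∈ Finset.range v, c i := by
  have hM1 : 1 ≤ M := hM ▸ Nat.one_le_two_pow
  obtain ⟨hlen, hval⟩ := h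
  rcases Nat.eq_zero_or_pos v with hv0 | hvpos
  · subst hv0
    rw [stQuery, if_pos (by omega)]
    simp
  · rw [stQuery, if_neg (by omega)]
    simp only []
    have han : ((0 : Int) + (M : Int)).toNat = M := by omega
    have hbn : (((v : Int) - 1) + (M : Int)).toNat = v - 1 + M := by omega
    rw [han, hbn]
    have hleaf : ∀ i, nodeVal M c (M + i) = c i := by
      intro i
      rw [nodeVal, if_neg (by omega), if_pos (by omega)]
      simp
    have hq := qloop_spec M c tree ⟨hlen, hval⟩ k (M) (v - 1 + M)
      (tree.getD M 0 + if M ≠ v - 1 + M then tree.getD (v - 1 + M) 0 else 0)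
      (by omega) (by omega) (by rw [pow_succ]; omega) (by omega)
    rw [hq, hval M (by omega)]
    have hM0 : nodeVal M c M = c 0 := by simpa using hleaf 0
    rcases Nat.eq_or_lt_of_le hvpos with hv1 | hv2
    · -- v = 1
      rw [show v - 1 + M = M by omega, if_neg (by omega), Finset.Ico_eq_empty (by omega),
        hM0, show v = 1 by omega]
      simp
    · -- v ≥ 2
      rw [if_pos (by omega), hval (v - 1 + M) (by omega), hM0]
      have hMv : nodeVal M c (v - 1 + M) = c (v - 1) := by
        rw [show v - 1 + M = M + (v - 1) by omega]
        exact hleaf (v - 1)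
      rw [hMv]
      have hmid : ∑ i ∈ Finset.Ico (M + 1) (v - 1 + M), nodeVal M c i
          = ∑ i ∈ Finset.Ico 1 (v - 1), c i := by
        rw [Finset.sum_Ico_eq_sum_range, Finset.sum_Ico_eq_sum_range]
        refine Finset.sum_congr (by congr 1; omega) ?_
        intro i _
        rw [show M + 1 + i = M + (1 + i) by omega, hleaf (1 + i)]
      rw [hmid]
      have hr : ∑ i ∈ Finset.range v, c i
          = (∑ i ∈ Finset.Ico 0 1, c i + ∑ i ∈ Finset.Ico 1 (v - 1), c i)
            + ∑ i ∈ Finset.Ico (v - 1) v, c i := by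
        rw [Finset.sum_Ico_consecutive _ (by omega) (by omega : (1 : Nat) ≤ v - 1),
          Finset.sum_Ico_consecutive _ (by omega) (by omega : v - 1 ≤ v),
          Finset.range_eq_Ico]
      have e1 : ∑ i ∈ Finset.Ico 0 1, c i = c 0 := by
        rw [Finset.sum_Ico_eq_sum_range]
        simp
      have e2 : ∑ i ∈ Finset.Ico (v - 1) v, c i = c (v - 1) := by
        rw [Finset.sum_Ico_eq_sum_range, show v - (v - 1) = 1 by omega]
        simp
      rw [hr, e1, e2]
      ring

theorem sum_count (P : List Nat) (v : Nat) :
    ∑ i ∈ Finset.range v, (P.count i : Int) = (P.countP (fun r => r < v) : Int) := by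
  induction P with
  | nil => simp
  | cons p P ih =>
    have step : ∀ i ∈ Finset.range v,
        ((p :: P).count i : Int) = (P.count i : Int) + (if p = i then 1 else 0) := by
      intro i _
      rw [List.count_cons]
      push_cast
      simp [beq_iff_eq]
    rw [Finset.sum_congr rfl step, Finset.sum_add_distrib, ih,
      Finset.sum_ite_eq (Finset.range v) p (fun _ => (1 : Int)),
      List.countP_cons]
    simp only [Finset.mem_range, decide_eq_true_eq]
    push_cast
    split_ifs <;> simp

theorem rk_lt (U : List Int) (hU : U.Pairwise (· < ·)) (x y : Int)
    (hx : x ∈ U) (hy : y ∈ U) : U.idxOf y < U.idxOf x ↔ y < x := by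
  have hxl : U.idxOf x < U.length := List.idxOf_lt_length_of_mem hx
  have hyl : U.idxOf y < U.length := List.idxOf_lt_length_of_mem hy
  have hgx : U[U.idxOf x] = x := List.getElem_idxOf hxl
  have hgy : U[U.idxOf y] = y := List.getElem_idxOf hyl
  have hmono := List.pairwise_iff_getElem.mp hU
  constructor
  · intro h
    have := hmono _ _ hyl hxl h
    rwa [hgx, hgy] at this
  · intro h
    rcases lt_trichotomy (U.idxOf y) (U.idxOf x) with h1 | h1 | h1
    · exact h1
    · simp only [h1] at hgy; rw [hgx] at hgy; omega
    · have := hmono _ _ hxl hyl h1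
      rw [hgx, hgy] at this; omega

theorem bsA_eq_idxOf (U : List Int) (hU : U.Pairwise (· < ·)) (x : Int) (hx : x ∈ U) :
    bsA U x = (U.idxOf x : Int) := by
  have hxl : U.idxOf x < U.length := List.idxOf_lt_length_of_mem hx
  exact bsLoop_spec U hU x (U.idxOf x) hxl (List.getElem_idxOf hxl) 0
    ((U.length : Int) - 1) (by omega) (by omega) (by omega) (by omega)

theorem mainLoop (U : List Int) (hU : U.Pairwise (· < ·)) (k M : Nat) (hM : M = 2 ^ k)
    (hlen : U.length ≤ M) (rest : List Int) :
    ∀ (pre : List Int) (tree : List Int) (ans : Int),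
    (∀ x ∈ rest, x ∈ U) → (∀ x ∈ pre, x ∈ U) →
    Agree M (fun i => (((pre.map (fun y => U.idxOf y)).count i : Nat) : Int)) tree →
    (rest.foldl
      (fun (s : List Int × Int) x =>
        (stAdd M s.1 (bsA U x).toNat 1, max s.2 (stQuery M s.1 0 (bsA U x - 1))))
      (tree, ans)).2
    = (rest.foldl
        (fun (s : List Int × Int) x =>
          let c := s.1.foldl (fun c y => if y < x then c + 1 else c) 0
          (s.1 ++ [x], if c > s.2 then c else s.2))
        (pre, ans)).2 := by
  induction rest with
  | nil => intro pre tree ans _ _ _; rfl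
  | cons x rest ih =>
    intro pre tree ans hrest hpre hAg
    have hxU : x ∈ U := hrest x List.mem_cons_self
    have hb : bsA U x = (U.idxOf x : Int) := bsA_eq_idxOf U hU x hxU
    have hixlen : U.idxOf x < U.length := List.idxOf_lt_length_of_mem hxU
    have hixM : U.idxOf x < M := lt_of_lt_of_le hixlen hlen
    simp only [List.foldl_cons]
    rw [hb, Int.toNat_natCast]
    have hq : stQuery M tree 0 ((U.idxOf x : Int) - 1)
        = ((pre.countP (fun y => decide (y < x)) : Nat) : Int) := by
      rw [stQuery_spec k M hM _ tree hAg (U.idxOf x) (by omega), sum_count]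
      congr 1
      rw [List.countP_map]
      refine List.countP_congr ?_
      intro y hy
      simp only [Function.comp_apply, decide_eq_true_eq]
      exact rk_lt U hU x y hxU (hpre y hy)
    have hc : pre.foldl (fun c y => if y < x then c + 1 else c) 0
        = ((pre.countP (fun y => decide (y < x)) : Nat) : Int) := by
      have := PySem.List.foldl_count_if (fun y => decide (y < x)) pre 0
      simp only [decide_eq_true_eq, zero_add] at this
      exact this
    have hmax : max ans (((pre.countP (fun y => decide (y < x)) : Nat) : Int))
        = if ((pre.countP (fun y => decide (y < x)) : Nat) : Int) > ans
          then ((pre.countP (fun y => decide (y < x)) : Nat) : Int) else ans := by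
      rw [max_def]
      split_ifs <;> omega
    rw [hq, hmax]
    simp only [hc]
    have hAg' : Agree M
        (fun i => ((((pre ++ [x]).map (fun y => U.idxOf y)).count i : Nat) : Int))
        (stAdd M tree (U.idxOf x) 1) := by
      have hs := stAdd_spec M _ tree (U.idxOf x) hixM hAg
      have hfun : (fun i => (((pre.map (fun y => U.idxOf y)).count i : Nat) : Int)
            + if i = U.idxOf x then 1 else 0)
          = (fun i => ((((pre ++ [x]).map (fun y => U.idxOf y)).count i : Nat) : Int)) := by
        funext i
        simp only [List.map_append, List.map_cons, List.map_nil, List.count_append,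
          List.count_cons, List.count_nil, beq_iff_eq]
        push_cast
        by_cases hix : i = U.idxOf x <;> simp [hix, eq_comm]
      rw [hfun] at hs
      exact hs
    exact ih (pre ++ [x]) (stAdd M tree (U.idxOf x) 1) _
      (fun y hy => hrest y (List.mem_cons_of_mem _ hy))
      (fun y hy => by
        rcases List.mem_append.mp hy with h | h
        · exact hpre y h
        · simp only [List.mem_singleton] at h
          exact h ▸ hxU)
      hAg'

-- ===== VERDICT (by name: the statement is the Claim_ definition above) =====
theorem maxrank_spec : Claim_equal_maxrank := by
  intro T _
  show maxrank T = maxrank_alt T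
  by_cases hT : T.length = 0
  · rw [List.length_eq_zero_iff.mp hT]
    rfl
  · rw [maxrank, if_neg hT]
    simp only []
    have hperm := mergeSortA_perm T
    have hsor := mergeSortA_sorted T
    have htmpne : mergeSortA T ≠ [] := by
      intro h
      have := hperm.length_eq
      rw [h] at this
      simp at this
      omega
    obtain ⟨h0, tl, htmp⟩ := List.exists_cons_of_ne_nil htmpne
    have ht0mem : (mergeSortA T).getD 0 0 ∈ mergeSortA T := by
      rw [htmp]
      simp
    have ht0le : ∀ y ∈ mergeSortA T, (mergeSortA T).getD 0 0 ≤ y := by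
      intro y hy
      rw [htmp] at hy hsor ⊢
      rcases List.mem_cons.mp hy with h | h
      · simp [h]
      · simpa using (List.pairwise_cons.mp hsor).1 y h
    obtain ⟨hUsort, hUmem⟩ := uniqAux_spec (mergeSortA T) ((mergeSortA T).getD 0 0) hsor ht0le
    set U := (mergeSortA T).getD 0 0 :: uniqAux ((mergeSortA T).getD 0 0) (mergeSortA T) with hUdef
    have hmemTU : ∀ y, y ∈ U ↔ y ∈ T := by
      intro y
      rw [hUmem y]
      constructor
      · rintro (rfl | h)
        · exact hperm.mem_iff.mp ht0mem
        · exact hperm.mem_iff.mp h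
      · intro h
        exact Or.inr (hperm.mem_iff.mpr h)
    obtain ⟨hp1, hpM⟩ := findP_ge (U.length + 2) U.length 1 (le_refl 1) (by
      have hpow : (2 : Nat) ^ (1 - 1) = 1 := by norm_num
      omega)
    set p := findP (U.length + 2) U.length 1 with hpdef
    have h2p : 2 ^ p = 2 * 2 ^ (p - 1) := by
      conv_lhs => rw [show p = (p - 1) + 1 from by omega]
      rw [pow_succ]
      ring
    have hAg0 : Agree (2 ^ (p - 1))
        (fun i => (((([] : List Int).map (fun y => U.idxOf y)).count i : Nat) : Int))
        (List.replicate (2 ^ p) 0) := by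
      constructor
      · simpa using h2p
      · intro j hj
        have hz : (fun i => (((([] : List Int).map (fun y => U.idxOf y)).count i : Nat) : Int))
            = fun _ => (0 : Int) := by
          funext i
          simp
        rw [hz, nodeVal_zero]
        simp [List.getD]
    rw [List.foldl_map]
    exact (mainLoop U hUsort (p - 1) (2 ^ (p - 1)) rfl hpM T [] (List.replicate (2 ^ p) 0) 0
      (fun x hx => (hmemTU x).mpr hx) (by simp) hAg0).trans rfl
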